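-- pv_equiv track=rewrite | github.com/MARafey/2026-NVIDIA | team-submissions/tests/test_bit_packing.py | pack_sequence
-- ===== SOURCE A (Python) =====
-- BITS_PER_ELEM = 2
--
-- def pack_sequence(seq: list[int], bits_per_elem: int = BITS_PER_ELEM) -> int:
--     """Pack a sequence into a uint64."""
--     packed = 0
--     mask = (1 << bits_per_elem) - 1
--     for i, elem in enumerate(seq):
--         # Map: -1 -> 0, +1 -> 1 (for binary)
--         # For larger alphabets, assume elem is already 0-indexed
--         if bits_per_elem == 1:
--             val = 1 if elem == 1 else 0
--         else:
--             val = elem & mask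
--         packed |= (val << (i * bits_per_elem))
--     return packed
-- ===== SOURCE B (Python) =====
-- BITS_PER_ELEM = 2
--
-- def pack_sequence(seq: list[int], bits_per_elem: int = BITS_PER_ELEM) -> int:
--     """Pack a sequence into a single integer: map each element to its base-2**bits
--     digit with %, then combine the digits with an arithmetic Horner fold."""
--     base = 1 << bits_per_elem
--     if bits_per_elem == 1:
--         vals = [1 if elem == 1 else 0 for elem in seq]
--     else:
--         vals = [elem % base for elem in seq]
--     packed = 0
--     for v in reversed(vals):
--         packed = packed * base + v
--     return packed
-- ===== Notes on version B (the rewrite author's own statement) =====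
-- stated objective: alternative
-- what changed: Replaces the single enumerate-and-bitwise pass (val = elem & mask; packed |= val << (i*bits)) by two stages with no bitwise ops on the data: a list comprehension reducing each element with % base, then an arithmetic Horner fold packed = packed*base + v over the reversed digit list.
import Mathlib
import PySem

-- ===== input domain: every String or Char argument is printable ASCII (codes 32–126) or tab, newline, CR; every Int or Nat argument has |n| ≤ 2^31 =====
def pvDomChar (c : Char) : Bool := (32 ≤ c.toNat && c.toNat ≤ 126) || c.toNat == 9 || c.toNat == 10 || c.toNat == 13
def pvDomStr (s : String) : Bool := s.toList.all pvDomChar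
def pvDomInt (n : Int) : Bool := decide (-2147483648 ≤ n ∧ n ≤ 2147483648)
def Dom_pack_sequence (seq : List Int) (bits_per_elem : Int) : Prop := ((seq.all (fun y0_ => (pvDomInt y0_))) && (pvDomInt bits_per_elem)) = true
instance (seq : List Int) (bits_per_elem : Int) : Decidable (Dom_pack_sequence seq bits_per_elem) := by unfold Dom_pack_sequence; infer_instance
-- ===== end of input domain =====

-- B packs in two arithmetic stages (a % digit map, then a multiply-add Horner fold) instead of A's
-- single enumerate-and-bitwise pass; return values agree (objective: alternative).

-- ===== PORT A =====
-- literal port of A: mask, then enumerate with packed |= val << (i*bits_per_elem);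
-- Python's shift counts are ints, nonnegative under Pre_, so '.toNat' is exact there
def pack_sequence (seq : List Int) (bits_per_elem : Int) : Int :=
  let mask : Int := (1 <<< bits_per_elem.toNat) - 1
  (PySem.List.enumerate seq).foldl
    (fun packed ie =>
      let val : Int := if bits_per_elem = 1 then (if ie.2 = 1 then 1 else 0)
                       else PySem.Int.band ie.2 mask
      PySem.Int.bor packed (val <<< (ie.1 * bits_per_elem).toNat)) 0

-- ===== PORT B =====
-- literal port of Source B: base = 1 << bits, a comprehension producing the digit list
-- (elem % base, or the 0/1 test when bits_per_elem == 1), then packed = packed*base + v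
-- over the reversed digit list
def pack_sequence_alt (seq : List Int) (bits_per_elem : Int) : Int :=
  let base : Int := 1 <<< bits_per_elem.toNat
  let vals : List Int :=
    if bits_per_elem = 1 then seq.map (fun elem => if elem = 1 then 1 else 0)
    else seq.map (fun elem => PySem.Int.mod elem base)
  vals.reverse.foldl (fun packed v => packed * base + v) 0

-- ===== PRECONDITION & SPEC =====
-- Python raises ValueError ('negative shift count') when bits_per_elem < 0, in A and in B alike
def Pre_pack_sequence (seq : List Int) (bits_per_elem : Int) : Prop := 0 ≤ bits_per_elem
instance (seq : List Int) (bits_per_elem : Int) : Decidable (Pre_pack_sequence seq bits_per_elem) := by unfold Pre_pack_sequence; infer_instance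
def pvWitness_pack_sequence : List Int × Int := ([1, -1, 2, 0], 2)
def Spec_pack_sequence (seq : List Int) (bits_per_elem : Int) (out : Int) : Prop := out = pack_sequence_alt seq bits_per_elem
instance (seq : List Int) (bits_per_elem : Int) (out : Int) : Decidable (Spec_pack_sequence seq bits_per_elem out) := by unfold Spec_pack_sequence; infer_instance

-- ===== CLAIM (what is proved, stated in full; the proofs are below) =====
def Claim_equal_pack_sequence : Prop := ∀ (seq : List Int) (bits_per_elem : Int), Dom_pack_sequence seq bits_per_elem → Pre_pack_sequence seq bits_per_elem → Spec_pack_sequence seq bits_per_elem (pack_sequence seq bits_per_elem)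

-- ===== LEMMAS AND PROOFS =====

-- the per-element value A computes (definitionally A's inlined 'val')
def pvVal (bpe e : Int) : Int :=
  if bpe = 1 then (if e = 1 then 1 else 0) else PySem.Int.band e ((1 <<< bpe.toNat) - 1)


-- A's loop body as a named function (definitionally equal to the lambda in the port)
def pvStepA (bpe : Int) (packed : Int) (ie : Int × Int) : Int :=
  PySem.Int.bor packed (pvVal bpe ie.2 <<< (ie.1 * bpe).toNat)

-- the common specification: little-endian base-2^bits digits
def pvS (bpe : Int) : List Int → Nat
  | [] => 0
  | e :: l => (pvVal bpe e).toNat + 2 ^ bpe.toNat * pvS bpe l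

theorem pvS_cons (bpe e : Int) (l : List Int) :
    pvS bpe (e :: l) = (pvVal bpe e).toNat + 2 ^ bpe.toNat * pvS bpe l := rfl

theorem pack_sequence_eq_fold (seq : List Int) (bpe : Int) :
    pack_sequence seq bpe = (PySem.List.enumerate seq).foldl (pvStepA bpe) 0 := rfl

theorem pv_lor_low (k : ℕ) : ∀ p v : ℕ, p < 2 ^ k → p ||| (v * 2 ^ k) = p + v * 2 ^ k := by
  induction k with
  | zero => intro p v h; interval_cases p; simp
  | succ k ih =>
    intro p v h
    have hp : p = Nat.bit p.bodd p.div2 := (Nat.bit_bodd_div2 p).symm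
    have hv : v * 2 ^ (k + 1) = Nat.bit false (v * 2 ^ k) := by
      simp [Nat.bit_val]; ring
    have hd : p.div2 < 2 ^ k := by
      rw [hp] at h; exact Nat.bit_lt_two_pow_succ_iff.mp h
    rw [hp, hv, Nat.lor_bit, ih p.div2 v hd]
    simp [Nat.bit_val]
    rw [hp]; simp [Nat.bit_val]; ring

theorem pv_shift_one (k : ℕ) : (((1 <<< k : Nat)) : Int) = ((2 ^ k : Nat) : Int) := by
  norm_num [Nat.shiftLeft_eq]

theorem pv_mask_eq (bpe : Int) :
    (((1 <<< bpe.toNat : Nat)) : Int) - 1 = ((2 ^ bpe.toNat - 1 : Nat) : Int) := by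
  rw [Nat.shiftLeft_eq, Nat.cast_sub Nat.one_le_two_pow]
  norm_num

theorem pvVal_nonneg (bpe e : Int) : 0 ≤ pvVal bpe e := by
  unfold pvVal
  split_ifs with h1 h2
  · norm_num
  · norm_num
  · rw [pv_mask_eq]
    unfold PySem.Int.band
    split_ifs with ha hb hb
    · exact Int.natCast_nonneg _
    · exact absurd (Int.natCast_nonneg _) hb
    · exact Int.natCast_nonneg _
    · exact absurd (Int.natCast_nonneg _) hb

theorem pvVal_toNat_lt (bpe e : Int) : (pvVal bpe e).toNat < 2 ^ bpe.toNat := by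
  have hpos : (0:Nat) < 2 ^ bpe.toNat := Nat.two_pow_pos _
  unfold pvVal
  split_ifs with h1 h2
  · subst h1; norm_num
  · subst h1; norm_num
  · rw [pv_mask_eq]
    have hle : (PySem.Int.band e ((2 ^ bpe.toNat - 1 : Nat) : Int)).toNat ≤ 2 ^ bpe.toNat - 1 := by
      unfold PySem.Int.band
      split_ifs with ha hb hb
      · simp only [Int.toNat_natCast]
        exact Nat.and_le_right
      · exact absurd (Int.natCast_nonneg _) hb
      · simp only [Int.toNat_natCast]
        omega
      · exact absurd (Int.natCast_nonneg _) hb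
    omega

-- A's loop, started at enumerate index i on a nonnegative accumulator below 2^(i*bits)
theorem pvA_loop (bpe : Int) (hb : 0 ≤ bpe) (l : List Int) :
    ∀ (i p : Nat), p < 2 ^ (i * bpe.toNat) →
      (PySem.List.enumerate l (i : Int)).foldl (pvStepA bpe) ((p : Nat) : Int)
        = ((p + 2 ^ (i * bpe.toNat) * pvS bpe l : Nat) : Int) := by
  induction l with
  | nil => intro i p hp; simp [PySem.List.enumerate, pvS]
  | cons e l ih =>
    intro i p hp
    rw [PySem.List.enumerate_cons]
    simp only [List.foldl_cons]
    have hv0 : (0:Int) ≤ pvVal bpe e := pvVal_nonneg bpe e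
    have hvlt : (pvVal bpe e).toNat < 2 ^ bpe.toNat := pvVal_toNat_lt bpe e
    have hsh : ((i : Int) * bpe).toNat = i * bpe.toNat := by
      conv_lhs => rw [show bpe = (bpe.toNat : Int) from (Int.toNat_of_nonneg hb).symm]
      rw [← Nat.cast_mul, Int.toNat_natCast]
    have step : pvStepA bpe ((p : Nat) : Int) ((i : Int), e)
        = ((p + (pvVal bpe e).toNat * 2 ^ (i * bpe.toNat) : Nat) : Int) := by
      unfold pvStepA
      simp only [hsh]
      rw [show pvVal bpe e = ((pvVal bpe e).toNat : Int) from (Int.toNat_of_nonneg hv0).symm]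
      rw [show (((pvVal bpe e).toNat : Int)) <<< (i * bpe.toNat)
            = (((pvVal bpe e).toNat <<< (i * bpe.toNat) : Nat) : Int) from by
        rw [Int.shiftLeft_eq, Nat.shiftLeft_eq]; push_cast; ring]
      rw [PySem.Int.bor_natCast, Nat.shiftLeft_eq,
        pv_lor_low (i * bpe.toNat) p (pvVal bpe e).toNat hp]
      simp
    rw [step]
    have hp' : p + (pvVal bpe e).toNat * 2 ^ (i * bpe.toNat) < 2 ^ ((i + 1) * bpe.toNat) := by
      have h2 : (1 + (pvVal bpe e).toNat) * 2 ^ (i * bpe.toNat) ≤ 2 ^ bpe.toNat * 2 ^ (i * bpe.toNat) :=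
        Nat.mul_le_mul_right _ (by omega)
      calc p + (pvVal bpe e).toNat * 2 ^ (i * bpe.toNat)
          < (1 + (pvVal bpe e).toNat) * 2 ^ (i * bpe.toNat) := by nlinarith [Nat.two_pow_pos (i * bpe.toNat)]
        _ ≤ 2 ^ bpe.toNat * 2 ^ (i * bpe.toNat) := h2
        _ = 2 ^ ((i + 1) * bpe.toNat) := by rw [← pow_add]; ring_nf
    rw [show ((i : Int) + 1) = (((i + 1 : Nat) : Nat) : Int) from by push_cast; ring]
    rw [ih (i + 1) _ hp']
    congr 1
    show p + (pvVal bpe e).toNat * 2 ^ (i * bpe.toNat) + 2 ^ ((i + 1) * bpe.toNat) * pvS bpe l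
        = p + 2 ^ (i * bpe.toNat) * pvS bpe (e :: l)
    rw [pvS_cons]
    rw [show 2 ^ ((i + 1) * bpe.toNat) = 2 ^ (i * bpe.toNat) * 2 ^ bpe.toNat from by rw [← pow_add]; ring_nf]
    ring

-- A's bitwise digit equals B's arithmetic digit: e & (2^k - 1) = e % 2^k, Python semantics
theorem pv_band_eq_mod (k : ℕ) (e : Int) :
    PySem.Int.band e (((1 <<< k : Nat) : Int) - 1) = PySem.Int.mod e ((1 <<< k : Nat) : Int) := by
  have hpos : (0:Int) < ((1 <<< k : Nat) : Int) := by rw [pv_shift_one]; exact_mod_cast Nat.two_pow_pos k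
  rw [PySem.Int.mod_eq_emod_of_pos hpos]
  rw [show ((1 <<< k : Nat) : Int) - 1 = ((2 ^ k - 1 : Nat) : Int) from by
    rw [Nat.shiftLeft_eq, Nat.cast_sub Nat.one_le_two_pow]; norm_num]
  rw [pv_shift_one]
  have hk : (1:Nat) ≤ 2 ^ k := Nat.one_le_two_pow
  unfold PySem.Int.band
  split_ifs with ha hb hb
  · -- 0 ≤ e
    simp only [Int.toNat_natCast]
    rw [Nat.and_two_pow_sub_one_eq_mod]
    rw [show e = ((e.toNat : Nat) : Int) from (Int.toNat_of_nonneg ha).symm]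
    push_cast
    rfl
  · exact absurd (by positivity) hb
  · -- e < 0
    set m : ℕ := (-e - 1).toNat with hm
    have hem : e = -(m : Int) - 1 := by omega
    simp only [Int.toNat_natCast]
    rw [Nat.and_comm, Nat.and_two_pow_sub_one_eq_mod]
    have hmr : m = 2 ^ k * (m / 2 ^ k) + m % 2 ^ k := (Nat.div_add_mod m (2 ^ k)).symm
    have hrlt : m % 2 ^ k < 2 ^ k := Nat.mod_lt _ (Nat.two_pow_pos k)
    have he' : e = ((2 ^ k - 1 - m % 2 ^ k : Nat) : Int) + (2 ^ k : Nat) * (-(↑(m / 2 ^ k)) - 1) := by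
      rw [hem]
      push_cast [Nat.sub_sub, Nat.cast_sub (by omega : 1 + m % 2 ^ k ≤ 2 ^ k)]
      nlinarith [hmr]
    have hlt : ((2 ^ k - 1 - m % 2 ^ k : Nat) : Int) < ((2 ^ k : Nat) : Int) := by
      have : 2 ^ k - 1 - m % 2 ^ k < 2 ^ k := by omega
      exact_mod_cast this
    rw [he', Int.add_mul_emod_self_left, Int.emod_eq_of_lt (by positivity) hlt]
  · exact absurd (by positivity) hb

-- B's digit list is exactly the pvVal map
theorem pv_vals_eq (bpe : Int) (seq : List Int) :
    (if bpe = 1 then seq.map (fun elem => if elem = 1 then (1:Int) else 0)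
     else seq.map (fun elem => PySem.Int.mod elem ((1 <<< bpe.toNat : Nat) : Int)))
      = seq.map (pvVal bpe) := by
  split_ifs with h1
  · subst h1; simp [pvVal]
  · refine List.map_congr_left fun a _ => ?_
    rw [pvVal, if_neg h1, pv_band_eq_mod]

-- B's Horner fold over the reversed digit list computes the digit sum
theorem pvB_loop (bpe : Int) (l : List Int) :
    ∀ (p : Nat), ((l.map (pvVal bpe)).reverse.foldl
        (fun packed v => packed * ((1 <<< bpe.toNat : Nat) : Int) + v) ((p : Nat) : Int))
      = ((p * 2 ^ (bpe.toNat * l.length) + pvS bpe l : Nat) : Int) := by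
  induction l with
  | nil => intro p; simp [pvS]
  | cons e l ih =>
    intro p
    simp only [List.map_cons, List.reverse_cons, List.foldl_append, ih p,
      List.foldl_cons, List.foldl_nil]
    rw [show pvVal bpe e = ((pvVal bpe e).toNat : Int) from (Int.toNat_of_nonneg (pvVal_nonneg bpe e)).symm]
    rw [pv_shift_one]
    push_cast
    rw [pvS_cons]
    simp only [List.length_cons]
    push_cast
    rw [show (2:Int) ^ (bpe.toNat * (l.length + 1)) = 2 ^ (bpe.toNat * l.length) * 2 ^ bpe.toNat from by
      rw [← pow_add]; ring_nf]
    ring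

-- ===== VERDICT (by name: the statement is the Claim_ definition above) =====
theorem pack_sequence_spec : Claim_equal_pack_sequence := by
  intro seq bpe _ hb
  unfold Spec_pack_sequence pack_sequence_alt
  rw [pack_sequence_eq_fold]
  simp only []
  rw [pv_vals_eq]
  have hA := pvA_loop bpe hb seq 0 0 (by simp)
  have hB := pvB_loop bpe seq 0
  simp only [Nat.cast_zero, Nat.zero_mul, pow_zero, Nat.one_mul, Nat.zero_add, Nat.zero_mul] at hA hB
  rw [hA, hB]
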